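-- pv_equiv track=rewrite | github.com/sofievargas/barrett-fellows | methods.py | triad_3
-- ===== SOURCE A (Python) =====
-- def triad_3 (nodes, edges):
--     #find triad 03: a-> b -> c
--         message = ""
--         count = 0
--         for node_a in nodes:
--             for node_b in nodes:
--                 if node_b != node_a: #skip if they are the same node
--                     edge_one = (node_a, node_b) #a -> b
--                     inverse_edge_one = (node_b, node_a) #a <- b
--                     if edge_one in edges and inverse_edge_one not in edges:
--                         for node_c in nodes:
--                             if node_c != node_b and node_c != node_a: #skip if they are the same node
--                                 edge_two = (node_b, node_c) #b -> c
--                                 inverse_edge_two = (node_c, node_b) #c <- b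
--                                 a_to_c = ((node_c, node_a) in edges) or ((node_a, node_c) in edges)
--                                 if message.find(""+ node_c + " -> " + node_b + " -> " + node_a + "\n") == -1:
--                                     if not a_to_c and edge_two in edges and inverse_edge_two not in edges and edge_one != edge_two:
--                                         triad = node_a + " -> " + node_b + " -> " + node_c + "\n"
--                                         message += triad
--                                         count+=1
--         return count
-- ===== SOURCE B (Python) =====
-- def triad_3(nodes, edges):
--     edge_set = set(edges)
--     succ = {b: [c for c in nodes
--                 if c != b and (b, c) in edge_set and (c, b) not in edge_set]
--             for b in nodes}
--     message = ""
--     count = 0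
--     for node_a in nodes:
--         for node_b in succ[node_a]:
--             for node_c in succ[node_b]:
--                 if node_c != node_a \
--                         and (node_a, node_c) not in edge_set \
--                         and (node_c, node_a) not in edge_set \
--                         and message.find(node_c + " -> " + node_b + " -> " + node_a + "\n") == -1:
--                     message += node_a + " -> " + node_b + " -> " + node_c + "\n"
--                     count += 1
--     return count
-- ===== Notes on version B (the rewrite author's own statement) =====
-- stated objective: faster
-- what changed: Builds a successor index (dict of each node's valid out-neighbours) and a hashed edge set once, so the triple loop walks only actual chain candidates a -> b in succ[a] -> c in succ[b] instead of scanning all nodes and the edge list at every step; A's reverse-chain message dedup is kept so the count matches exactly even for node names that collide inside the message buffer.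
import Mathlib
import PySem

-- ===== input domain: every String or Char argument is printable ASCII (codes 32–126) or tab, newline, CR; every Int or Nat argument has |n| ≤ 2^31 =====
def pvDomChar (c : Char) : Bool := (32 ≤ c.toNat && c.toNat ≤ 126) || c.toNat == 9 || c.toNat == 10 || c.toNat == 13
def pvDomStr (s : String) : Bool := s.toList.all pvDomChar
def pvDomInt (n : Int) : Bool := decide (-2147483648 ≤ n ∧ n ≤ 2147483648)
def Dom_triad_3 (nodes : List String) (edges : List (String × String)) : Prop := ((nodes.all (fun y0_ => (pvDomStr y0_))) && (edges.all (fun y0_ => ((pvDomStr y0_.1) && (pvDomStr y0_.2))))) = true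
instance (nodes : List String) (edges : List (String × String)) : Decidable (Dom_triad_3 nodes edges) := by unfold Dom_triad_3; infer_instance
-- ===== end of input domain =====

-- B replaces A's full triple node scan with a precomputed successor index and a hashed
-- edge set, walking only actual chain candidates; it keeps A's reverse-chain message
-- dedup, so the returned count equals A's on every input.

-- ===== PORT A =====
-- loop bodies of A's three nested for-loops, transliterated
def triadInnerF (edges : List (String × String)) (node_a node_b : String)
    (st : String × Int) (node_c : String) : String × Int :=
  if node_c ≠ node_b ∧ node_c ≠ node_a then
    if PySem.Str.find st.1 ("" ++ node_c ++ " -> " ++ node_b ++ " -> " ++ node_a ++ "\n") = -1 then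
      if ¬((node_c, node_a) ∈ edges ∨ (node_a, node_c) ∈ edges) ∧
          (node_b, node_c) ∈ edges ∧ (node_c, node_b) ∉ edges ∧
          (node_a, node_b) ≠ (node_b, node_c) then
        (st.1 ++ (node_a ++ " -> " ++ node_b ++ " -> " ++ node_c ++ "\n"), st.2 + 1)
      else st
    else st
  else st

def triadMidF (nodes : List String) (edges : List (String × String)) (node_a : String)
    (st : String × Int) (node_b : String) : String × Int :=
  if node_b ≠ node_a then
    if (node_a, node_b) ∈ edges ∧ (node_b, node_a) ∉ edges then
      nodes.foldl (triadInnerF edges node_a node_b) st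
    else st
  else st

def triadOutF (nodes : List String) (edges : List (String × String))
    (st : String × Int) (node_a : String) : String × Int :=
  nodes.foldl (triadMidF nodes edges node_a) st

def triad_3 (nodes : List String) (edges : List (String × String)) : Int :=
  (nodes.foldl (triadOutF nodes edges) ("", 0)).2

-- ===== PORT B =====
-- the successor predicate B filters with
def succP (es : PySem.Set (String × String)) (b c : String) : Bool :=
  c ≠ b && PySem.Set.contains es (b, c) && !PySem.Set.contains es (c, b)

-- the dict comprehension: succ[b] = [c for c in nodes if c != b and (b,c) in edge_set and (c,b) not in edge_set]
def altSucc (nodes : List String) (es : PySem.Set (String × String)) :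
    PySem.Dict String (List String) :=
  nodes.foldl (fun d b => PySem.Dict.insert d b (nodes.filter (succP es b)))
    PySem.Dict.empty

-- body of B's innermost loop
def altInnerF (es : PySem.Set (String × String)) (node_a node_b : String)
    (st : String × Int) (node_c : String) : String × Int :=
  if node_c ≠ node_a ∧ ¬PySem.Set.contains es (node_a, node_c) ∧
      ¬PySem.Set.contains es (node_c, node_a) ∧
      PySem.Str.find st.1 (node_c ++ " -> " ++ node_b ++ " -> " ++ node_a ++ "\n") = -1 then
    (st.1 ++ (node_a ++ " -> " ++ node_b ++ " -> " ++ node_c ++ "\n"), st.2 + 1)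
  else st

-- succ[x]: the key is always present (x ∈ nodes), so .getD [] is Python's succ[x]
def triad_3_alt (nodes : List String) (edges : List (String × String)) : Int :=
  let es := PySem.Set.ofList edges
  let succ := altSucc nodes es
  (nodes.foldl (fun st node_a =>
      (PySem.Dict.getD succ node_a []).foldl (fun st node_b =>
        (PySem.Dict.getD succ node_b []).foldl (altInnerF es node_a node_b) st) st)
    ("", 0)).2

-- ===== PRECONDITION & SPEC =====
def Spec_triad_3 (nodes : List String) (edges : List (String × String)) (out : Int) : Prop := out = triad_3_alt nodes edges
instance (nodes : List String) (edges : List (String × String)) (out : Int) : Decidable (Spec_triad_3 nodes edges out) := by unfold Spec_triad_3; infer_instance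

-- ===== CLAIM (what is proved, stated in full; the proofs are below) =====
def Claim_equal_triad_3 : Prop := ∀ (nodes : List String) (edges : List (String × String)), Dom_triad_3 nodes edges → Spec_triad_3 nodes edges (triad_3 nodes edges)

-- ===== LEMMAS AND PROOFS =====

theorem contains_ofList_eq (edges : List (String × String)) (x : String × String) :
    PySem.Set.contains (PySem.Set.ofList edges) x = decide (x ∈ edges) := by
  by_cases h : x ∈ edges
  · simp [h, (PySem.Set.contains_iff _ _).mpr ((PySem.Set.mem_ofList _ _).mpr h)]
  · simp only [h, decide_false]
    by_contra hc
    exact h ((PySem.Set.mem_ofList _ _).mp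
      ((PySem.Set.contains_iff _ _).mp (by revert hc; cases PySem.Set.contains (PySem.Set.ofList edges) x <;> simp)))

-- the dict comprehension looked up at a key in nodes
theorem altSucc_get (nodes : List String) (es : PySem.Set (String × String))
    (l : List String) (d : PySem.Dict String (List String)) (a : String) :
    PySem.Dict.getD (l.foldl (fun d b => PySem.Dict.insert d b (nodes.filter (succP es b))) d) a []
      = if a ∈ l then nodes.filter (succP es a) else PySem.Dict.getD d a [] := by
  induction l generalizing d with
  | nil => simp
  | cons b l ih =>
    simp only [List.foldl_cons, ih, List.mem_cons]
    by_cases hl : a ∈ l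
    · simp [hl]
    · by_cases hb : a = b
      · subst hb; simp [hl, PySem.Dict.getD_insert]
      · simp [hl, hb, PySem.Dict.getD_insert]

-- folding a step that ignores non-p elements equals folding the matching step over the filter
theorem foldl_filter_eq {α σ : Type} (p : α → Bool) (f g : σ → α → σ) (l : List α)
    (h0 : ∀ st x, x ∈ l → p x = false → f st x = st)
    (h1 : ∀ st x, x ∈ l → p x = true → f st x = g st x) :
    ∀ st, l.foldl f st = (l.filter p).foldl g st := by
  induction l with
  | nil => intro st; rfl
  | cons a l ih =>
    intro st
    have h0' : ∀ st x, x ∈ l → p x = false → f st x = st :=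
      fun st x hx => h0 st x (List.mem_cons_of_mem _ hx)
    have h1' : ∀ st x, x ∈ l → p x = true → f st x = g st x :=
      fun st x hx => h1 st x (List.mem_cons_of_mem _ hx)
    by_cases hp : p a
    · rw [List.foldl_cons, List.filter_cons_of_pos hp, List.foldl_cons,
        h1 st a List.mem_cons_self hp, ih h0' h1']
    · rw [List.foldl_cons, List.filter_cons_of_neg (by simpa using hp),
        h0 st a List.mem_cons_self (by simpa using hp), ih h0' h1']

-- the two innermost loops agree: A's scan of all nodes is B's walk of succ[b]
theorem inner_eq (nodes : List String) (edges : List (String × String))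
    (a b : String) (hba : b ≠ a) :
    ∀ st, nodes.foldl (triadInnerF edges a b) st =
      (nodes.filter (succP (PySem.Set.ofList edges) b)).foldl
        (altInnerF (PySem.Set.ofList edges) a b) st := by
  apply foldl_filter_eq
  · -- elements failing succP are no-ops for A
    intro st c _ hp
    simp only [succP, contains_ofList_eq, Bool.and_eq_false_iff, Bool.not_eq_true',
      decide_eq_false_iff_not, not_not, Bool.not_eq_false', decide_eq_true_eq] at hp
    unfold triadInnerF
    rcases hp with hp | hp
    · rcases hp with hp | hp
      · rw [if_neg (by tauto)]
      · split
        · split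
          · rw [if_neg (by tauto)]
          · rfl
        · rfl
    · split
      · split
        · rw [if_neg (by tauto)]
        · rfl
      · rfl
  · -- on succ[b] the two bodies coincide
    intro st c _ hp
    simp only [succP, Bool.and_eq_true, contains_ofList_eq, Bool.not_eq_eq_eq_not,
      Bool.not_true, decide_eq_false_iff_not, decide_eq_true_eq] at hp
    obtain ⟨⟨hcb, hbc⟩, hcbE⟩ := hp
    have hcb' : (c : String) ≠ b := by simpa using hcb
    unfold triadInnerF altInnerF
    simp only [contains_ofList_eq, decide_eq_true_eq]
    by_cases hca : c = a
    · subst hca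
      rw [if_neg (by tauto), if_neg (by tauto)]
    · rw [if_pos ⟨hcb', hca⟩]
      have hpat : ("" ++ c ++ " -> " ++ b ++ " -> " ++ a ++ "\n")
          = (c ++ " -> " ++ b ++ " -> " ++ a ++ "\n") := by
        simp
      rw [hpat]
      have hab : ((a, b) : String × String) ≠ (b, c) := by
        intro h
        exact hba (congrArg Prod.fst h).symm
      by_cases hfind : PySem.Str.find st.1 (c ++ " -> " ++ b ++ " -> " ++ a ++ "\n") = -1
      · rw [if_pos hfind]
        by_cases hac : ¬((c, a) ∈ edges ∨ (a, c) ∈ edges)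
        · rw [if_pos ⟨hac, hbc, hcbE, hab⟩, if_pos ⟨hca, fun h => hac (Or.inr h), fun h => hac (Or.inl h), hfind⟩]
        · rw [if_neg (by tauto), if_neg (by tauto)]
      · rw [if_neg hfind, if_neg (by tauto)]

-- the middle loops agree: A's scan of all nodes is B's walk of succ[a]
theorem mid_eq (nodes : List String) (edges : List (String × String)) (a : String) :
    ∀ st, nodes.foldl (triadMidF nodes edges a) st =
      (nodes.filter (succP (PySem.Set.ofList edges) a)).foldl
        (fun st b => (nodes.filter (succP (PySem.Set.ofList edges) b)).foldl
          (altInnerF (PySem.Set.ofList edges) a b) st) st := by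
  apply foldl_filter_eq
  · intro st b _ hp
    simp only [succP, Bool.and_eq_false_iff, Bool.not_eq_true', contains_ofList_eq,
      decide_eq_false_iff_not, not_not, Bool.not_eq_false', decide_eq_true_eq] at hp
    unfold triadMidF
    rcases hp with hp | hp
    · rcases hp with hp | hp
      · rw [if_neg (by tauto)]
      · split
        · rw [if_neg (by tauto)]
        · rfl
    · split
      · rw [if_neg (by tauto)]
      · rfl
  · intro st b _ hp
    simp only [succP, Bool.and_eq_true, contains_ofList_eq, Bool.not_eq_eq_eq_not,
      Bool.not_true, decide_eq_false_iff_not, decide_eq_true_eq] at hp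
    obtain ⟨⟨hb, habE⟩, hbaE⟩ := hp
    have hb' : (b : String) ≠ a := by simpa using hb
    unfold triadMidF
    rw [if_pos hb', if_pos ⟨habE, hbaE⟩, inner_eq nodes edges a b hb' st]

-- ===== VERDICT (by name: the statement is the Claim_ definition above) =====
theorem triad_3_spec : Claim_equal_triad_3 := by
  intro nodes edges _hdom
  unfold Spec_triad_3 triad_3 triad_3_alt
  congr 1
  apply PySem.List.foldl_congr_mem
  intro st a ha
  unfold triadOutF altSucc
  rw [altSucc_get nodes (PySem.Set.ofList edges) nodes PySem.Dict.empty a, if_pos ha,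
    mid_eq nodes edges a st]
  apply PySem.List.foldl_congr_mem
  intro st b hb
  have hbn : b ∈ nodes := List.mem_of_mem_filter hb
  rw [altSucc_get nodes (PySem.Set.ofList edges) nodes PySem.Dict.empty b, if_pos hbn]
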